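-- pv_equiv track=rewrite | github.com/rawatamit/adventofcode | 2018/d6.py | within_max_distance
-- ===== SOURCE A (Python) =====
-- def manhattan_distance(x1, y1, x2, y2):
--     return abs(x1 - x2) + abs(y1 - y2)
--
-- def total_manhattan_distance(x, y, coords):
--     return sum([manhattan_distance(x, y, x2, y2)
--                 for x2, y2 in coords])
--
-- def within_max_distance(min_x, max_x, min_y, max_y, coords, max_dist):
--     within_region = []
--
--     for y in range(min_y, max_y + 1):
--         for x in range(min_x, max_x + 1):
--             dist = total_manhattan_distance(x, y, coords)
--             if dist < max_dist:
--                 within_region.append((x, y))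
--
--     return within_region
-- ===== SOURCE B (Python) =====
-- def within_max_distance(min_x, max_x, min_y, max_y, coords, max_dist):
--     # Separable Manhattan sums: per-column and per-row distance totals, combined per cell.
--     if max_x < min_x or max_y < min_y:
--         return []
--     col = [(x, sum(abs(x - cx) for cx, _ in coords)) for x in range(min_x, max_x + 1)]
--     row = [(y, sum(abs(y - cy) for _, cy in coords)) for y in range(min_y, max_y + 1)]
--     return [(x, y) for y, r in row for x, c in col if c + r < max_dist]
-- ===== Notes on version B (the rewrite author's own statement) =====
-- stated objective: alternative
-- what changed: Exploits separability of Manhattan distance: precomputes per-column and per-row distance sums once and combines them per cell (with an early return on an empty grid), instead of summing over all coords at every grid cell; intended as asymptotically faster (O((W+H)n+WH) vs O(WHn)) but a timing run could not confirm it on its input family.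
import Mathlib
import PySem

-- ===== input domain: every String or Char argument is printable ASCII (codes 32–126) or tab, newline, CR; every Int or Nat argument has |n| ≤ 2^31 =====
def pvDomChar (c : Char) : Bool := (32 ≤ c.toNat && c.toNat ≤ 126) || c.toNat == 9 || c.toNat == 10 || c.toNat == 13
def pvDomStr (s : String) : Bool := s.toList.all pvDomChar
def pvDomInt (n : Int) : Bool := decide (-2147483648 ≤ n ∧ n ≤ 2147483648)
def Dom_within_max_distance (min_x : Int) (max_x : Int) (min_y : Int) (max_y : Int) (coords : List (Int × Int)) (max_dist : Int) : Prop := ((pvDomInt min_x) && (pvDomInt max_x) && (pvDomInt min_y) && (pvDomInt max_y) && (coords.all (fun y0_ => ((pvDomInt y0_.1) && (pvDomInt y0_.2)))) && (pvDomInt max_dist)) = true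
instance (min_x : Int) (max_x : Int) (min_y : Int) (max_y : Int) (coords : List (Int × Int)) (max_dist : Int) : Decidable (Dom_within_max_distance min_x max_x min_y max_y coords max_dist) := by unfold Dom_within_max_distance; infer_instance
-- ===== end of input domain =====

-- B replaces A's per-cell sum over all coords by precomputed per-column/per-row distance sums (separable Manhattan distance), combined per cell.
-- ===== PORT A =====
def manhattan_distance (x1 : Int) (y1 : Int) (x2 : Int) (y2 : Int) : Int :=
  |x1 - x2| + |y1 - y2|

def total_manhattan_distance (x : Int) (y : Int) (coords : List (Int × Int)) : Int :=
  (coords.map (fun p => manhattan_distance x y p.1 p.2)).sum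

def within_max_distance (min_x : Int) (max_x : Int) (min_y : Int) (max_y : Int) (coords : List (Int × Int)) (max_dist : Int) : List (Int × Int) :=
  (PySem.List.pyRange min_y (max_y + 1) 1).foldl (fun within_region y =>
    (PySem.List.pyRange min_x (max_x + 1) 1).foldl (fun within_region x =>
      if total_manhattan_distance x y coords < max_dist then
        within_region ++ [(x, y)]
      else within_region) within_region) []

-- ===== PORT B =====
def within_max_distance_alt (min_x : Int) (max_x : Int) (min_y : Int) (max_y : Int) (coords : List (Int × Int)) (max_dist : Int) : List (Int × Int) :=
  if max_x < min_x ∨ max_y < min_y then [] else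
  let col := (PySem.List.pyRange min_x (max_x + 1) 1).map
    (fun x => (x, (coords.map (fun p => |x - p.1|)).sum))
  let row := (PySem.List.pyRange min_y (max_y + 1) 1).map
    (fun y => (y, (coords.map (fun p => |y - p.2|)).sum))
  row.flatMap (fun yr => col.filterMap (fun xc =>
    if xc.2 + yr.2 < max_dist then some (xc.1, yr.1) else none))

-- ===== PRECONDITION & SPEC =====
def Spec_within_max_distance (min_x : Int) (max_x : Int) (min_y : Int) (max_y : Int) (coords : List (Int × Int)) (max_dist : Int) (out : List (Int × Int)) : Prop := out = within_max_distance_alt min_x max_x min_y max_y coords max_dist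
instance (min_x : Int) (max_x : Int) (min_y : Int) (max_y : Int) (coords : List (Int × Int)) (max_dist : Int) (out : List (Int × Int)) : Decidable (Spec_within_max_distance min_x max_x min_y max_y coords max_dist out) := by unfold Spec_within_max_distance; infer_instance

-- ===== CLAIM (what is proved, stated in full; the proofs are below) =====
def Claim_equal_within_max_distance : Prop := ∀ (min_x : Int) (max_x : Int) (min_y : Int) (max_y : Int) (coords : List (Int × Int)) (max_dist : Int), Dom_within_max_distance min_x max_x min_y max_y coords max_dist → Spec_within_max_distance min_x max_x min_y max_y coords max_dist (within_max_distance min_x max_x min_y max_y coords max_dist)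

-- ===== LEMMAS AND PROOFS =====

-- ===== VERDICT (by name: the statement is the Claim_ definition above) =====
-- per-cell separability: the total Manhattan distance splits into a column sum plus a row sum
lemma total_split (x y : Int) (coords : List (Int × Int)) :
    total_manhattan_distance x y coords
      = (coords.map (fun p => |x - p.1|)).sum + (coords.map (fun p => |y - p.2|)).sum := by
  induction coords with
  | nil => simp [total_manhattan_distance]
  | cons h t ih =>
    simp only [total_manhattan_distance, List.map_cons, List.sum_cons] at *
    rw [ih]; simp [manhattan_distance]; ring

-- loop shape: append-if accumulator loop is a filterMap
lemma foldl_append_if_prop {a b : Type} (p : a → Prop) [DecidablePred p] (f : a → b)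
    (l : List a) (acc : List b) :
    l.foldl (fun acc x => if p x then acc ++ [f x] else acc) acc
      = acc ++ l.filterMap (fun x => if p x then some (f x) else none) := by
  induction l generalizing acc with
  | nil => simp
  | cons h t ih =>
    by_cases hp : p h <;> simp [List.foldl_cons, hp, ih]

-- loop shape: extend-accumulator loop is a flatMap
lemma foldl_append_flat {a b : Type} (g : a → List b) (l : List a) (acc : List b) :
    l.foldl (fun acc y => acc ++ g y) acc = acc ++ l.flatMap g := by
  induction l generalizing acc with
  | nil => simp
  | cons h t ih => simp [List.foldl_cons, ih]

theorem within_max_distance_spec : Claim_equal_within_max_distance := by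
  intro min_x max_x min_y max_y coords max_dist _
  unfold Spec_within_max_distance within_max_distance within_max_distance_alt
  by_cases hg : max_x < min_x ∨ max_y < min_y
  · rw [if_pos hg]
    rcases hg with hx | hy
    · simp [PySem.List.pyRange_one_eq_nil (show (max_x + 1 : Int) ≤ min_x by omega)]
    · simp [PySem.List.pyRange_one_eq_nil (show (max_y + 1 : Int) ≤ min_y by omega)]
  · rw [if_neg hg]
    simp only [foldl_append_if_prop (fun x => total_manhattan_distance x _ coords < max_dist)]
    simp only [foldl_append_flat, List.nil_append, List.flatMap_map, List.filterMap_map]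
    apply List.flatMap_congr
    intro y _
    apply List.filterMap_congr
    intro x _
    simp only [Function.comp, total_split]
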